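-- pv_equiv track=rewrite | github.com/kevinveenbirkenbach/infinito-deployer | apps/api/services/role_index/categories.py | _load_explicit_mapping
-- ===== SOURCE A (Python) =====
-- from typing import Dict, Iterable, List
--
-- def _dedupe(values: Iterable[str]) -> List[str]:
--     out: List[str] = []
--     seen: set[str] = set()
--     for value in values:
--         key = value.strip().lower()
--         if not key or key in seen:
--             continue
--         seen.add(key)
--         out.append(value.strip())
--     return out
--
-- def _load_explicit_mapping(data: object) -> Dict[str, List[str]]:
--     mapping: Dict[str, List[str]] = {}
--     if not isinstance(data, dict):
--         return mapping
--     for cat, roles in data.items():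
--         if not isinstance(cat, str) or not isinstance(roles, list):
--             continue
--         cat_name = cat.strip()
--         if not cat_name:
--             continue
--         for role_id in roles:
--             if isinstance(role_id, str) and role_id.strip():
--                 mapping.setdefault(role_id.strip(), []).append(cat_name)
--     return {key: _dedupe(values) for key, values in mapping.items()}
-- ===== SOURCE B (Python) =====
-- from typing import Dict, List
--
-- def _load_explicit_mapping(data: object) -> Dict[str, List[str]]:
--     mapping: Dict[str, List[str]] = {}
--     if not isinstance(data, dict):
--         return mapping
--     seen: Dict[str, set] = {}
--     for cat, roles in data.items():
--         if not isinstance(cat, str) or not isinstance(roles, list):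
--             continue
--         cat_name = cat.strip()
--         if not cat_name:
--             continue
--         key = cat_name.lower()
--         for role_id in roles:
--             if not (isinstance(role_id, str) and role_id.strip()):
--                 continue
--             role = role_id.strip()
--             keys = seen.setdefault(role, set())
--             if key not in keys:
--                 keys.add(key)
--                 mapping.setdefault(role, []).append(cat_name)
--     return mapping
-- ===== Notes on version B (the rewrite author's own statement) =====
-- stated objective: simpler
-- what changed: B drops the _dedupe helper and the final dict-comprehension pass: it dedupes inline during the single inversion pass, keeping a parallel dict of per-role seen sets of lowered category keys and appending a category only when its lowered key is new for that role.
import Mathlib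
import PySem

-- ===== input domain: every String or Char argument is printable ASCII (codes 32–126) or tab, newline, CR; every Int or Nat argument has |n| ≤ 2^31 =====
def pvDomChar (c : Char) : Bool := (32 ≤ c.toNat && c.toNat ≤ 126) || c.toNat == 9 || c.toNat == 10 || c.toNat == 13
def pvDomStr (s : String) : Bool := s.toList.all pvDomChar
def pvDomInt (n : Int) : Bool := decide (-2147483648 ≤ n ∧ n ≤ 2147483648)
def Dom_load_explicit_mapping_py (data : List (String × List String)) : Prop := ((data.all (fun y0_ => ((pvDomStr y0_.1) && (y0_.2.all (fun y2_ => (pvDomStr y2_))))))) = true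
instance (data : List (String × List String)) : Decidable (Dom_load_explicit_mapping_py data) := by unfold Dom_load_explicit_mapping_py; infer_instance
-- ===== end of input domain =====

-- B replaces A's two passes (invert, then dedupe every value list) by one inversion pass with
-- per-role seen-sets of lowered keys; return values only are compared (neither version mutates its input).
-- The Python argument is a dict: both ports first decode the assoc list into the dict it denotes
-- (duplicate keys: last value wins, first position kept), exactly as dict(pairs) does.
def pvDictArg (data : List (String × List String)) : List (String × List String) :=
  (PySem.Dict.ofList data).items

-- ===== PORT A =====
-- step of _dedupe's loop body (named so the proofs can speak about one step)
def pvDedStep (st : List String × PySem.Set String) (value : String) : List String × PySem.Set String :=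
  let key := PySem.Str.lower (PySem.Str.strip value)
  if key = "" ∨ PySem.Set.contains st.2 key then st
  else (st.1 ++ [PySem.Str.strip value], PySem.Set.add st.2 key)

def pvDedupe (values : List String) : List String :=
  (values.foldl pvDedStep ([], PySem.Set.empty)).1

-- the isinstance(cat, str) / isinstance(roles, list) / isinstance(role_id, str) guards are
-- always true under the typed signature, so they are identically-true branches here.
def load_explicit_mapping_py (data : List (String × List String)) : List (String × List String) :=
  let mapping : PySem.Dict String (List String) :=
    (pvDictArg data).foldl
      (fun mapping p =>
        let cat_name := PySem.Str.strip p.1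
        if cat_name = "" then mapping
        else p.2.foldl
          (fun mapping role_id =>
            if PySem.Str.strip role_id = "" then mapping
            else PySem.Dict.modify mapping (PySem.Str.strip role_id) [] (· ++ [cat_name]))
          mapping)
      PySem.Dict.empty
  mapping.items.map (fun kv => (kv.1, pvDedupe kv.2))

-- ===== PORT B =====
def load_explicit_mapping_py_alt (data : List (String × List String)) : List (String × List String) :=
  ((pvDictArg data).foldl
    (fun (st : PySem.Dict String (List String) × PySem.Dict String (PySem.Set String)) p =>
      let cat_name := PySem.Str.strip p.1
      if cat_name = "" then st
      else
        let key := PySem.Str.lower cat_name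
        p.2.foldl
          (fun st role_id =>
            if PySem.Str.strip role_id = "" then st
            else
              let role := PySem.Str.strip role_id
              let keys := PySem.Dict.getD st.2 role PySem.Set.empty
              if PySem.Set.contains keys key then st
              else (PySem.Dict.modify st.1 role [] (· ++ [cat_name]),
                    PySem.Dict.insert st.2 role (PySem.Set.add keys key)))
          st)
    (PySem.Dict.empty, PySem.Dict.empty)).1.items

-- ===== PRECONDITION & SPEC =====
def Spec_load_explicit_mapping_py (data : List (String × List String)) (out : List (String × List String)) : Prop := out = load_explicit_mapping_py_alt data
instance (data : List (String × List String)) (out : List (String × List String)) : Decidable (Spec_load_explicit_mapping_py data out) := by unfold Spec_load_explicit_mapping_py; infer_instance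

-- ===== CLAIM (what is proved, stated in full; the proofs are below) =====
def Claim_equal_load_explicit_mapping_py : Prop := ∀ (data : List (String × List String)), Dom_load_explicit_mapping_py data → Spec_load_explicit_mapping_py data (load_explicit_mapping_py data)

-- ===== LEMMAS AND PROOFS =====

-- the (role, category) append events both loops process, in order
def pvEvents (items : List (String × List String)) : List (String × String) :=
  items.flatMap (fun p =>
    if PySem.Str.strip p.1 = "" then []
    else (p.2.filter (fun r => !decide (PySem.Str.strip r = ""))).map
      (fun r => (PySem.Str.strip r, PySem.Str.strip p.1)))

def pvStepA (m : PySem.Dict String (List String)) (e : String × String) :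
    PySem.Dict String (List String) :=
  PySem.Dict.modify m e.1 [] (· ++ [e.2])

def pvStepB (st : PySem.Dict String (List String) × PySem.Dict String (PySem.Set String))
    (e : String × String) :
    PySem.Dict String (List String) × PySem.Dict String (PySem.Set String) :=
  let key := PySem.Str.lower e.2
  let keys := PySem.Dict.getD st.2 e.1 PySem.Set.empty
  if PySem.Set.contains keys key then st
  else (PySem.Dict.modify st.1 e.1 [] (· ++ [e.2]),
        PySem.Dict.insert st.2 e.1 (PySem.Set.add keys key))

def pvDkeys (vs : List String) : PySem.Set String :=
  (vs.foldl pvDedStep ([], PySem.Set.empty)).2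

def pvF (p : String × List String) : String × List String := (p.1, pvDedupe p.2)

def pvRel (mA : PySem.Dict String (List String))
    (st : PySem.Dict String (List String) × PySem.Dict String (PySem.Set String)) : Prop :=
  st.1.items = mA.items.map pvF
  ∧ (∀ r, PySem.Dict.getD st.2 r PySem.Set.empty = pvDkeys (PySem.Dict.getD mA r []))
  ∧ (∀ p ∈ mA.items, ∀ v ∈ p.2, PySem.Str.strip v = v ∧ v ≠ "")
  ∧ mA.keys.Nodup

-- string facts --------------------------------------------------------------

lemma pv_dropWhile_idem (p : Char → Bool) (x : List Char) :
    (x.dropWhile p).dropWhile p = x.dropWhile p := by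
  induction x with
  | nil => simp
  | cons a l ih =>
    by_cases h : p a = true
    · rw [List.dropWhile_cons, if_pos h]; exact ih
    · rw [List.dropWhile_cons, if_neg h, List.dropWhile_cons, if_neg h]

lemma pv_dropWhile_prefix_self {p : Char → Bool} {l l' : List Char}
    (h : l.dropWhile p = l) (hpre : l' <+: l) : l'.dropWhile p = l' := by
  cases l' with
  | nil => simp
  | cons a t =>
    obtain ⟨rest, rfl⟩ := hpre
    have ha : ¬ p a = true := by
      intro hpa
      rw [List.cons_append, List.dropWhile_cons, if_pos hpa] at h
      have h2 := congrArg List.length h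
      have hle := List.length_dropWhile_le p (t ++ rest)
      simp [List.length_append] at h2 hle
      omega
    rw [List.dropWhile_cons, if_neg ha]

lemma pv_chars_strip_idem (x : List Char) :
    PySem.Chars.strip (PySem.Chars.strip x) = PySem.Chars.strip x := by
  simp only [PySem.Chars.strip, PySem.Chars.lstrip, PySem.Chars.rstrip]
  have hu : ((x.dropWhile PySem.Chars.isspace).reverse.dropWhile PySem.Chars.isspace).reverse.dropWhile PySem.Chars.isspace
      = ((x.dropWhile PySem.Chars.isspace).reverse.dropWhile PySem.Chars.isspace).reverse := by
    apply pv_dropWhile_prefix_self (pv_dropWhile_idem PySem.Chars.isspace x)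
    obtain ⟨pre, hpre⟩ := List.dropWhile_suffix (l := (x.dropWhile PySem.Chars.isspace).reverse) PySem.Chars.isspace
    exact ⟨pre.reverse, by rw [← List.reverse_append, hpre, List.reverse_reverse]⟩
  rw [hu, List.reverse_reverse, pv_dropWhile_idem]

lemma pv_strip_idem (s : String) : PySem.Str.strip (PySem.Str.strip s) = PySem.Str.strip s := by
  apply String.ext
  show (PySem.Str.strip (PySem.Str.strip s)).toList = _
  rw [PySem.Str.toList_strip, PySem.Str.toList_strip, pv_chars_strip_idem]

lemma pv_lower_ne_empty {s : String} (h : s ≠ "") : PySem.Str.lower s ≠ "" := by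
  intro hl
  apply h
  apply String.ext
  have h2 := congrArg String.toList hl
  rw [PySem.Str.toList_lower] at h2
  simpa [PySem.Chars.lower] using h2

-- dedupe step facts ---------------------------------------------------------

lemma pv_dedStep_eq {c : String} (hs : PySem.Str.strip c = c) (hne : c ≠ "")
    (st : List String × PySem.Set String) :
    pvDedStep st c =
      if PySem.Set.contains st.2 (PySem.Str.lower c) then st
      else (st.1 ++ [c], PySem.Set.add st.2 (PySem.Str.lower c)) := by
  unfold pvDedStep
  rw [hs]
  have hk := pv_lower_ne_empty hne
  by_cases hc : PySem.Str.lower c ∈ st.2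
  · simp [hc]
  · simp [hc, hk]

lemma pv_dedupe_append {c : String} (hs : PySem.Str.strip c = c) (hne : c ≠ "") (vs : List String) :
    pvDedupe (vs ++ [c]) =
      if PySem.Set.contains (pvDkeys vs) (PySem.Str.lower c) then pvDedupe vs
      else pvDedupe vs ++ [c] := by
  simp only [pvDedupe, pvDkeys]
  rw [List.foldl_append, List.foldl_cons, List.foldl_nil, pv_dedStep_eq hs hne]
  by_cases hc : PySem.Str.lower c ∈ (vs.foldl pvDedStep (([] : List String), ([] : PySem.Set String))).2
  · simp [hc, PySem.Set.empty]
  · simp [hc, PySem.Set.empty]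

lemma pv_dkeys_append {c : String} (hs : PySem.Str.strip c = c) (hne : c ≠ "") (vs : List String) :
    pvDkeys (vs ++ [c]) =
      if PySem.Set.contains (pvDkeys vs) (PySem.Str.lower c) then pvDkeys vs
      else PySem.Set.add (pvDkeys vs) (PySem.Str.lower c) := by
  simp only [pvDkeys]
  rw [List.foldl_append, List.foldl_cons, List.foldl_nil, pv_dedStep_eq hs hne]
  by_cases hc : PySem.Str.lower c ∈ (vs.foldl pvDedStep (([] : List String), ([] : PySem.Set String))).2
  · simp [hc, PySem.Set.empty]
  · simp [hc, PySem.Set.empty]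

-- dict bridging -------------------------------------------------------------

lemma pv_keys_map {mA mB : PySem.Dict String (List String)}
    (h : mB.items = mA.items.map pvF) : mB.keys = mA.keys := by
  simp only [PySem.Dict.keys, h, List.map_map]
  rfl

lemma pv_entry_eq_getD {mA : PySem.Dict String (List String)} {p : String × List String}
    (hmem : p ∈ mA.items) (hnd : mA.keys.Nodup) : PySem.Dict.getD mA p.1 [] = p.2 := by
  exact PySem.Dict.getD_of_mem_items mA (by simpa using hmem) hnd []

lemma pv_getD_map {mA mB : PySem.Dict String (List String)}
    (h : mB.items = mA.items.map pvF) (hnd : mA.keys.Nodup) (r : String) :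
    PySem.Dict.getD mB r [] = pvDedupe (PySem.Dict.getD mA r []) := by
  by_cases hr : r ∈ mA.keys
  · simp only [PySem.Dict.keys, List.mem_map] at hr
    obtain ⟨p, hp, hp1⟩ := hr
    have hA : PySem.Dict.getD mA r [] = p.2 := hp1 ▸ pv_entry_eq_getD hp hnd
    have hndB : mB.keys.Nodup := (pv_keys_map h) ▸ hnd
    have hmemB : (r, pvDedupe p.2) ∈ mB.items := by
      rw [h]
      exact hp1 ▸ List.mem_map_of_mem hp
    rw [hA, PySem.Dict.getD_of_mem_items mB hmemB hndB []]
  · have hcA : mA.contains r = false := by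
      rw [PySem.Dict.contains_eq_decide_mem_keys]; simpa using hr
    have hcB : mB.contains r = false := by
      rw [PySem.Dict.contains_eq_decide_mem_keys, pv_keys_map h]; simpa using hr
    rw [PySem.Dict.getD_of_not_contains mA [] hcA, PySem.Dict.getD_of_not_contains mB [] hcB]
    rfl

lemma pv_mem_items_of_contains {d : PySem.Dict String (List String)} {k : String}
    (hc : d.contains k = true) (hnd : d.keys.Nodup) :
    (k, PySem.Dict.getD d k []) ∈ d.items := by
  have hk : k ∈ d.keys := (PySem.Dict.contains_iff_mem_keys d k).mp hc
  simp only [PySem.Dict.keys, List.mem_map] at hk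
  obtain ⟨p, hp, hp1⟩ := hk
  have h2 := pv_entry_eq_getD hp hnd
  rw [← hp1, h2]
  simpa using hp

-- the simulation step -------------------------------------------------------

lemma pv_rel_step {mA : PySem.Dict String (List String)}
    {st : PySem.Dict String (List String) × PySem.Dict String (PySem.Set String)}
    (hrel : pvRel mA st) {e : String × String}
    (hs : PySem.Str.strip e.2 = e.2) (hne : e.2 ≠ "") :
    pvRel (pvStepA mA e) (pvStepB st e) := by
  obtain ⟨h1, h2, h3, h4⟩ := hrel
  obtain ⟨role, c⟩ := e
  simp only at hs hne
  have hstepA : pvStepA mA (role, c)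
      = PySem.Dict.insert mA role (PySem.Dict.getD mA role [] ++ [c]) := rfl
  have hvs_good : ∀ v ∈ PySem.Dict.getD mA role [], PySem.Str.strip v = v ∧ v ≠ "" := by
    intro v hv
    cases hc : mA.contains role with
    | false => rw [PySem.Dict.getD_of_not_contains mA [] hc] at hv; simp at hv
    | true => exact h3 _ (pv_mem_items_of_contains hc h4) v hv
  have h4' : (pvStepA mA (role, c)).keys.Nodup := by
    rw [hstepA]; exact PySem.Dict.nodup_keys_insert _ _ _ h4
  have h3' : ∀ p ∈ (pvStepA mA (role, c)).items, ∀ v ∈ p.2, PySem.Str.strip v = v ∧ v ≠ "" := by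
    rw [hstepA]
    intro p hp v hv
    rcases (PySem.Dict.mem_items_insert _ _ _ _).mp hp with hpe | ⟨hpm, _⟩
    · subst hpe
      rcases List.mem_append.mp hv with hva | hvc
      · exact hvs_good v hva
      · have := List.mem_singleton.mp hvc
        subst this
        exact ⟨hs, hne⟩
    · exact h3 p hpm v hv
  by_cases hseen : PySem.Str.lower c ∈ pvDkeys (PySem.Dict.getD mA role [])
  · -- already seen: B's state is unchanged, A's dedupe swallows the append
    have hB : pvStepB st (role, c) = st := by
      simp only [pvStepB]
      rw [if_pos (by rw [h2 role]; exact (PySem.Set.contains_iff _ _).mpr hseen)]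
    rw [hB]
    have hcA : mA.contains role = true := by
      cases hc : mA.contains role with
      | true => rfl
      | false =>
        rw [PySem.Dict.getD_of_not_contains mA [] hc] at hseen
        simp [pvDkeys] at hseen
    have hd := pv_dedupe_append hs hne (PySem.Dict.getD mA role [])
    rw [if_pos ((PySem.Set.contains_iff _ _).mpr hseen)] at hd
    refine ⟨?_, ?_, h3', h4'⟩
    · rw [hstepA, PySem.Dict.items_insert_of_contains mA _ hcA, List.map_map, h1]
      apply List.map_congr_left
      intro p hp
      by_cases hb : (p.1 == role) = true
      · have hp1 : p.1 = role := by simpa using hb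
        have hp2 := pv_entry_eq_getD hp h4
        rw [hp1] at hp2
        simp [pvF, hp1, ← hp2, hd]
      · simp only [Function.comp_apply, if_neg hb]
    · intro r
      rw [hstepA, PySem.Dict.getD_insert]
      by_cases hr : r = role
      · subst hr
        rw [if_pos rfl, pv_dkeys_append hs hne,
          if_pos ((PySem.Set.contains_iff _ _).mpr hseen), h2 r]
      · rw [if_neg hr]; exact h2 r
  · -- new key: B appends too
    have hnc : ¬ (PySem.Set.contains (PySem.Dict.getD st.2 role PySem.Set.empty)
        (PySem.Str.lower c) = true) := by
      rw [h2 role]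
      intro hx
      exact hseen ((PySem.Set.contains_iff _ _).mp hx)
    have hB : pvStepB st (role, c)
        = (PySem.Dict.modify st.1 role [] (· ++ [c]),
           PySem.Dict.insert st.2 role
             (PySem.Set.add (PySem.Dict.getD st.2 role PySem.Set.empty) (PySem.Str.lower c))) := by
      simp only [pvStepB]
      rw [if_neg hnc]
    rw [hB]
    have hgetB : PySem.Dict.getD st.1 role [] = pvDedupe (PySem.Dict.getD mA role []) :=
      pv_getD_map h1 h4 role
    have hmod : PySem.Dict.modify st.1 role [] (· ++ [c])
        = PySem.Dict.insert st.1 role (pvDedupe (PySem.Dict.getD mA role []) ++ [c]) := by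
      rw [← hgetB]
      rfl
    have hcB : st.1.contains role = mA.contains role := by
      rw [PySem.Dict.contains_eq_decide_mem_keys, PySem.Dict.contains_eq_decide_mem_keys,
        pv_keys_map h1]
    have hd := pv_dedupe_append hs hne (PySem.Dict.getD mA role [])
    rw [if_neg (fun hx => hseen ((PySem.Set.contains_iff _ _).mp hx))] at hd
    refine ⟨?_, ?_, h3', h4'⟩
    · show (PySem.Dict.modify st.1 role [] (· ++ [c])).items = _
      rw [hmod, hstepA]
      cases hcA : mA.contains role with
      | true =>
        rw [PySem.Dict.items_insert_of_contains _ _ (hcB.trans hcA),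
          PySem.Dict.items_insert_of_contains _ _ hcA, h1, List.map_map, List.map_map]
        apply List.map_congr_left
        intro p hp
        by_cases hb : (p.1 == role) = true
        · have hp1 : p.1 = role := by simpa using hb
          have hp2 := pv_entry_eq_getD hp h4
          rw [hp1] at hp2
          simp [pvF, hp1, ← hp2, hd]
        · simp only [Function.comp_apply, pvF, if_neg hb]
      | false =>
        rw [PySem.Dict.items_insert_of_not_contains _ _ (hcB.trans hcA),
          PySem.Dict.items_insert_of_not_contains _ _ hcA, List.map_append, h1]
        simp [pvF, hd]
    · intro r
      rw [hstepA, PySem.Dict.getD_insert, PySem.Dict.getD_insert]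
      by_cases hr : r = role
      · subst hr
        rw [if_pos rfl, if_pos rfl, pv_dkeys_append hs hne,
          if_neg (fun hx => hseen ((PySem.Set.contains_iff _ _).mp hx)), h2 r]
      · rw [if_neg hr, if_neg hr]; exact h2 r

lemma pv_rel_fold {es : List (String × String)}
    (hgood : ∀ e ∈ es, PySem.Str.strip e.2 = e.2 ∧ e.2 ≠ "")
    {mA : PySem.Dict String (List String)}
    {st : PySem.Dict String (List String) × PySem.Dict String (PySem.Set String)}
    (hrel : pvRel mA st) :
    pvRel (es.foldl pvStepA mA) (es.foldl pvStepB st) := by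
  induction es generalizing mA st with
  | nil => exact hrel
  | cons e es ih =>
    exact ih (fun e' he' => hgood e' (List.mem_cons_of_mem _ he'))
      (pv_rel_step hrel (hgood e (List.mem_cons_self ..)).1 (hgood e (List.mem_cons_self ..)).2)

lemma pv_events_good (items : List (String × List String)) :
    ∀ e ∈ pvEvents items, PySem.Str.strip e.2 = e.2 ∧ e.2 ≠ "" := by
  intro e he
  simp only [pvEvents, List.mem_flatMap] at he
  obtain ⟨p, _, hp⟩ := he
  by_cases h : PySem.Str.strip p.1 = ""
  · simp [h] at hp
  · simp only [h, if_false, List.mem_map] at hp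
    obtain ⟨r, _, rfl⟩ := hp
    exact ⟨pv_strip_idem p.1, h⟩

-- the two loops compute the event folds -------------------------------------

lemma pv_innerA (c : String) (roles : List String) (m : PySem.Dict String (List String)) :
    roles.foldl (fun m rid => if PySem.Str.strip rid = "" then m
        else PySem.Dict.modify m (PySem.Str.strip rid) [] (· ++ [c])) m
    = ((roles.filter (fun r => !decide (PySem.Str.strip r = ""))).map
        (fun r => (PySem.Str.strip r, c))).foldl pvStepA m := by
  induction roles generalizing m with
  | nil => rfl
  | cons r roles ih =>
    by_cases h : PySem.Str.strip r = "" <;> simp [h, ih, pvStepA]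

lemma pv_innerB (c : String) (roles : List String)
    (st : PySem.Dict String (List String) × PySem.Dict String (PySem.Set String)) :
    roles.foldl
      (fun st role_id =>
        if PySem.Str.strip role_id = "" then st
        else
          let role := PySem.Str.strip role_id
          let keys := PySem.Dict.getD st.2 role PySem.Set.empty
          if PySem.Set.contains keys (PySem.Str.lower c) then st
          else (PySem.Dict.modify st.1 role [] (· ++ [c]),
                PySem.Dict.insert st.2 role (PySem.Set.add keys (PySem.Str.lower c)))) st
    = ((roles.filter (fun r => !decide (PySem.Str.strip r = ""))).map
        (fun r => (PySem.Str.strip r, c))).foldl pvStepB st := by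
  induction roles generalizing st with
  | nil => rfl
  | cons r roles ih =>
    by_cases h : PySem.Str.strip r = ""
    · rw [List.foldl_cons, if_pos h, List.filter_cons, if_neg (by simp [h])]
      exact ih st
    · rw [List.filter_cons, if_pos (show (!decide (PySem.Str.strip r = "")) = true by simp [h]),
        List.map_cons, List.foldl_cons, List.foldl_cons, if_neg h]
      exact ih _

lemma pv_loopA_eq (items : List (String × List String)) (m : PySem.Dict String (List String)) :
    items.foldl
      (fun mapping p =>
        let cat_name := PySem.Str.strip p.1
        if cat_name = "" then mapping
        else p.2.foldl
          (fun mapping role_id =>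
            if PySem.Str.strip role_id = "" then mapping
            else PySem.Dict.modify mapping (PySem.Str.strip role_id) [] (· ++ [cat_name]))
          mapping) m
    = (pvEvents items).foldl pvStepA m := by
  induction items generalizing m with
  | nil => rfl
  | cons p items ih =>
    rw [List.foldl_cons, pvEvents, List.flatMap_cons, List.foldl_append, ← pvEvents, ih]
    by_cases h : PySem.Str.strip p.1 = ""
    · simp [h]
    · simp only [h, if_false, pv_innerA]

lemma pv_loopB_eq (items : List (String × List String))
    (st : PySem.Dict String (List String) × PySem.Dict String (PySem.Set String)) :
    items.foldl
      (fun st p =>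
        let cat_name := PySem.Str.strip p.1
        if cat_name = "" then st
        else
          let key := PySem.Str.lower cat_name
          p.2.foldl
            (fun st role_id =>
              if PySem.Str.strip role_id = "" then st
              else
                let role := PySem.Str.strip role_id
                let keys := PySem.Dict.getD st.2 role PySem.Set.empty
                if PySem.Set.contains keys key then st
                else (PySem.Dict.modify st.1 role [] (· ++ [cat_name]),
                      PySem.Dict.insert st.2 role (PySem.Set.add keys key)))
            st) st
    = (pvEvents items).foldl pvStepB st := by
  induction items generalizing st with
  | nil => rfl
  | cons p items ih =>
    rw [List.foldl_cons, pvEvents, List.flatMap_cons, List.foldl_append, ← pvEvents, ih]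
    by_cases h : PySem.Str.strip p.1 = ""
    · simp [h]
    · simp only [h, if_false, pv_innerB]

-- ===== VERDICT (by name: the statement is the Claim_ definition above) =====
theorem load_explicit_mapping_py_spec : Claim_equal_load_explicit_mapping_py := by
  intro data _
  show load_explicit_mapping_py data = load_explicit_mapping_py_alt data
  unfold load_explicit_mapping_py load_explicit_mapping_py_alt
  rw [pv_loopA_eq, pv_loopB_eq]
  have hrel : pvRel ((pvEvents (pvDictArg data)).foldl pvStepA PySem.Dict.empty)
      ((pvEvents (pvDictArg data)).foldl pvStepB (PySem.Dict.empty, PySem.Dict.empty)) := by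
    refine pv_rel_fold (pv_events_good _) ?_
    refine ⟨rfl, fun r => ?_, by simp [PySem.Dict.empty], by simp [PySem.Dict.empty]⟩
    simp [PySem.Dict.getD_empty, pvDkeys]
  exact hrel.1.symm
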